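-- pv_equiv track=rewrite | github.com/thistleknot/arxiv_rag | extraction/convert_to_gliner_format.py | group_adjacent_tokens
-- ===== SOURCE A (Python) =====
-- from typing import List, Dict, Tuple
--
-- def find_token_indices(tokens: List[str], sentence_lower: str, char_offset: int = 0) -> List[Tuple[int, int]]:
--     """Find character positions of tokens in sentence."""
--     positions = []
--     pos = 0
--
--     for token in tokens:
--         pos = sentence_lower.find(token, pos)
--         if pos == -1:
--             continue
--         positions.append((pos, pos + len(token)))
--         pos += len(token)
--
--     return positions
--
-- def group_adjacent_tokens(sentence_lower: str, atomic_tokens: List[str], max_gap: int = 1) -> List[Tuple[int, int]]: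
--     """Group adjacent character positions into spans."""
--     positions = find_token_indices(atomic_tokens, sentence_lower)
--
--     if not positions:
--         return []
--
--     # Sort by start position
--     positions.sort(key=lambda x: x[0])
--
--     # Group adjacent positions
--     spans = []
--     current_start, current_end = positions[0]
--
--     for i in range(1, len(positions)):
--         start, end = positions[i]
--         gap = start - current_end
--
--         if gap <= max_gap:  # Adjacent (allowing whitespace)
--             current_end = end  # Extend span
--         else:
--             # Save current span, start new one
--             spans.append((current_start, current_end))
--             current_start, current_end = start, end
--
--     # Add final span
--     spans.append((current_start, current_end))
--     return spans
-- ===== SOURCE B (Python) =====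
-- from typing import List, Tuple
--
-- def group_adjacent_tokens(sentence_lower: str, atomic_tokens: List[str], max_gap: int = 1) -> List[Tuple[int, int]]:
--     """Single pass: locate each token and merge into spans on the fly (no position list, no sort)."""
--     spans = []
--     cur = None  # (current_start, current_end) of the open span, or None
--     pos = 0
--     for token in atomic_tokens:
--         pos = sentence_lower.find(token, pos)
--         if pos == -1:
--             continue
--         start, end = pos, pos + len(token)
--         pos = end
--         if cur is None:
--             cur = (start, end)
--         elif start - cur[1] <= max_gap:
--             cur = (cur[0], end)
--         else:
--             spans.append(cur)
--             cur = (start, end)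
--     if cur is not None:
--         spans.append(cur)
--     return spans
-- ===== Notes on version B (the rewrite author's own statement) =====
-- stated objective: simpler
-- what changed: B fuses token search and span grouping into one pass with a cursor and an open-span accumulator, dropping A's intermediate position list and its sort (a no-op under Pre_, where find emits nondecreasing starts).
-- outside the precondition, e.g. on group_adjacent_tokens('ab', ['ab', '', 'z', ''], 1): A returns [(0, 2)], B returns [(0, 1)]
import Mathlib
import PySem

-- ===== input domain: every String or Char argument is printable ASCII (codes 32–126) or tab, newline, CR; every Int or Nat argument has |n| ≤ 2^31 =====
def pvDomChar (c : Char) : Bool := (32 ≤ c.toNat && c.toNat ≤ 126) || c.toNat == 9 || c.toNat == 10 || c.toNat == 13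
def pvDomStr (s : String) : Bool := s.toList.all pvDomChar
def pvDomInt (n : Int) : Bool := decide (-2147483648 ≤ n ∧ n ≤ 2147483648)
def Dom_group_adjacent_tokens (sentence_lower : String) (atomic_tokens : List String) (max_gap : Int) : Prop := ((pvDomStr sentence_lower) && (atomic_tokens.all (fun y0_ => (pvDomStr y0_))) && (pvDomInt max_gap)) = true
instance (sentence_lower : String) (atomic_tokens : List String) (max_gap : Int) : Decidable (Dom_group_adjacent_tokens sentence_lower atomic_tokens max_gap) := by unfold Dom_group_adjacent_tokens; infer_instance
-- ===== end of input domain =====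

-- B is a single fused pass: it merges each found token into the open span on the fly,
-- dropping A's intermediate position list and its (no-op) sort; return-value equivalence only.

-- ===== PORT A =====
-- one iteration of the `for token in tokens` loop of find_token_indices
def pvFindStep (s : String) (st : List (Int × Int) × Int) (token : String) : List (Int × Int) × Int :=
  let pos := PySem.Str.findFrom s token st.2
  if pos = -1 then (st.1, pos)
  else (st.1 ++ [(pos, pos + (PySem.Str.len token : Int))], pos + (PySem.Str.len token : Int))

-- char_offset is Python's unused default parameter, kept for arity fidelity
def find_token_indices (tokens : List String) (sentence_lower : String) (char_offset : Int) : List (Int × Int) :=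
  (tokens.foldl (pvFindStep sentence_lower) ([], 0)).1

-- one iteration of the `for i in range(1, len(positions))` loop
def pvGroupStep (max_gap : Int) (acc : List (Int × Int) × Int × Int) (pe : Int × Int) : List (Int × Int) × Int × Int :=
  let gap := pe.1 - acc.2.2
  if gap ≤ max_gap then (acc.1, acc.2.1, pe.2)
  else (acc.1 ++ [(acc.2.1, acc.2.2)], pe.1, pe.2)

def group_adjacent_tokens (sentence_lower : String) (atomic_tokens : List String) (max_gap : Int) : List (Int × Int) :=
  let positions := find_token_indices atomic_tokens sentence_lower 0
  if positions = [] then []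
  else
    match PySem.List.sorted positions (fun x => x.1) false with
    | [] => []
    | p0 :: rest =>
      let st := rest.foldl (pvGroupStep max_gap) ([], p0.1, p0.2)
      st.1 ++ [(st.2.1, st.2.2)]

-- ===== PORT B =====
-- one iteration of B's single `for token in atomic_tokens` loop
def pvFusedStep (s : String) (max_gap : Int) (acc : List (Int × Int) × Option (Int × Int) × Int)
    (token : String) : List (Int × Int) × Option (Int × Int) × Int :=
  let pos := PySem.Str.findFrom s token acc.2.2
  if pos = -1 then (acc.1, acc.2.1, pos)
  else
    let start := pos
    let e := pos + (PySem.Str.len token : Int)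
    match acc.2.1 with
    | none => (acc.1, some (start, e), e)
    | some cur =>
      if start - cur.2 ≤ max_gap then (acc.1, some (cur.1, e), e)
      else (acc.1 ++ [cur], some (start, e), e)

def group_adjacent_tokens_alt (sentence_lower : String) (atomic_tokens : List String) (max_gap : Int) : List (Int × Int) :=
  let st := atomic_tokens.foldl (pvFusedStep sentence_lower max_gap) ([], none, 0)
  match st.2.1 with
  | none => st.1
  | some cur => st.1 ++ [cur]

-- ===== PRECONDITION & SPEC =====
-- Pre_ excludes token lists that contain the empty string together with a nonempty token that is a
-- suffix of the sentence: only there can A's pos = -1 rewind emit positions out of order, and A's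
-- sorted-then-grouped value on them is an accident of its implementation as defensible as B's
-- discovery-order grouping.
def Pre_group_adjacent_tokens (sentence_lower : String) (atomic_tokens : List String) (max_gap : Int) : Prop :=
  (∀ t ∈ atomic_tokens, t ≠ "") ∨
  (∀ t ∈ atomic_tokens, t ≠ "" → PySem.Str.endswith sentence_lower t = false)
instance (sentence_lower : String) (atomic_tokens : List String) (max_gap : Int) : Decidable (Pre_group_adjacent_tokens sentence_lower atomic_tokens max_gap) := by unfold Pre_group_adjacent_tokens; infer_instance

def pvWitness_group_adjacent_tokens : String × List String × Int := ("the cat sat", ["the", "cat"], 1)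

def Spec_group_adjacent_tokens (sentence_lower : String) (atomic_tokens : List String) (max_gap : Int) (out : List (Int × Int)) : Prop := out = group_adjacent_tokens_alt sentence_lower atomic_tokens max_gap
instance (sentence_lower : String) (atomic_tokens : List String) (max_gap : Int) (out : List (Int × Int)) : Decidable (Spec_group_adjacent_tokens sentence_lower atomic_tokens max_gap out) := by unfold Spec_group_adjacent_tokens; infer_instance

-- ===== CLAIM (what is proved, stated in full; the proofs are below) =====
def Claim_equal_group_adjacent_tokens : Prop := ∀ (sentence_lower : String) (atomic_tokens : List String) (max_gap : Int), Dom_group_adjacent_tokens sentence_lower atomic_tokens max_gap → Pre_group_adjacent_tokens sentence_lower atomic_tokens max_gap → Spec_group_adjacent_tokens sentence_lower atomic_tokens max_gap (group_adjacent_tokens sentence_lower atomic_tokens max_gap)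

-- ===== LEMMAS AND PROOFS =====

-- findFrom with start -1 is findFrom from the clamped index len-1
theorem pvFindFrom_neg_one (s sub : List Char) :
    PySem.Chars.findFrom s sub (-1) = PySem.Chars.findFrom s sub ((s.length - 1 : Nat) : Int) := by
  simp only [PySem.Chars.findFrom]
  have h1 : ((-1 : Int) < 0) := by norm_num
  have h2 : ¬ (((s.length - 1 : Nat) : Int) < 0) := by
    simp only [not_lt]; positivity
  rw [if_pos h1, if_neg h2]
  have hst : (if (-1 : Int) + (s.length : Int) < 0 then (0:Int) else -1 + (s.length : Int)) = ((s.length - 1 : Nat) : Int) := by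
    split_ifs <;> omega
  rw [hst]

-- a successful findFrom of a nonempty sub from a Nat start k lands in [k, len - |sub|]
theorem pvFindFrom_bounds (s sub : List Char) (k : Nat) (hk : k ≤ s.length) (hsub : sub ≠ [])
    (h : PySem.Chars.findFrom s sub (k : Int) ≠ -1) :
    (k : Int) ≤ PySem.Chars.findFrom s sub (k : Int) ∧
      PySem.Chars.findFrom s sub (k : Int) + sub.length ≤ s.length := by
  obtain ⟨h1, h2, -⟩ := PySem.Chars.findFrom_natCast_spec s sub k hk h
  have h3 : sub.length ≤ (List.drop (PySem.Chars.findFrom s sub (k : Int)).toNat s).length := h2.length_le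
  have h4 : 0 < sub.length := List.length_pos_of_ne_nil hsub
  simp only [List.length_drop] at h3
  omega

-- invariant of A's find loop: cursor in {-1} ∪ [0,len], recorded starts nondecreasing,
-- each start ≤ len-1 and ≤ the cursor when the cursor is not -1
def pvInv (s : String) (st : List (Int × Int) × Int) : Prop :=
  (st.2 = -1 ∨ (0 ≤ st.2 ∧ st.2 ≤ s.toList.length)) ∧
  st.1.Pairwise (fun p q => p.1 ≤ q.1) ∧
  ∀ p ∈ st.1, p.1 ≤ (s.toList.length : Int) - 1 ∧ (st.2 ≠ -1 → p.1 ≤ st.2)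

theorem pvInv_step (s token : String) (st : List (Int × Int) × Int)
    (ht : token ≠ "") (h : pvInv s st) : pvInv s (pvFindStep s st token) := by
  obtain ⟨hpos, hpw, hmem⟩ := h
  have htok : token.toList ≠ [] := by
    intro hnil
    exact ht (by simpa [String.toList_eq_nil_iff] using hnil)
  have htokpos : 0 < token.toList.length := List.length_pos_of_ne_nil htok
  simp only [pvFindStep]
  by_cases hneg : PySem.Str.findFrom s token st.2 = -1
  · simp only [hneg]
    exact ⟨Or.inl rfl, hpw, fun p hp => ⟨(hmem p hp).1, fun hc => absurd rfl hc⟩⟩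
  · simp only [if_neg hneg]
    have hbridge : PySem.Str.findFrom s token st.2 = PySem.Chars.findFrom s.toList token.toList st.2 := by
      simp
    obtain ⟨k, hk, hkeq, hkstart⟩ :
        ∃ k : Nat, k ≤ s.toList.length ∧
          PySem.Str.findFrom s token st.2 = PySem.Chars.findFrom s.toList token.toList (k : Int) ∧
          ∀ p ∈ st.1, p.1 ≤ (k : Int) := by
      rcases hpos with h1 | ⟨h1, h2⟩
      · refine ⟨s.toList.length - 1, by omega, ?_, ?_⟩
        · rw [hbridge, h1, pvFindFrom_neg_one]
        · intro p hp
          have := (hmem p hp).1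
          omega
      · refine ⟨st.2.toNat, by omega, ?_, ?_⟩
        · rw [hbridge]
          have hcast : st.2 = ((st.2.toNat : Nat) : Int) := by omega
          rw [← hcast]
        · intro p hp
          have := (hmem p hp).2 (by omega)
          omega
    have hbounds := pvFindFrom_bounds s.toList token.toList k hk htok (by rw [← hkeq]; exact hneg)
    rw [← hkeq] at hbounds
    obtain ⟨hge, hub⟩ := hbounds
    have hlen : (PySem.Str.len token : Int) = (token.toList.length : Int) := by
      simp [PySem.Str.len]
    rw [hlen]
    refine ⟨Or.inr ⟨by omega, by omega⟩, ?_, ?_⟩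
    · rw [List.pairwise_append]
      refine ⟨hpw, List.pairwise_singleton _ _, ?_⟩
      intro p hp q hq
      rw [List.mem_singleton] at hq
      subst hq
      exact le_trans (hkstart p hp) hge
    · intro p hp
      rw [List.mem_append, List.mem_singleton] at hp
      rcases hp with hp | hp
      · have ha := (hmem p hp).1
        have hb := le_trans (hkstart p hp) hge
        exact ⟨ha, fun _ => by omega⟩
      · subst hp
        exact ⟨by omega, fun _ => by omega⟩

theorem pvInv_fold (s : String) (ts : List String) :
    ∀ st, (∀ t ∈ ts, t ≠ "") → pvInv s st → pvInv s (ts.foldl (pvFindStep s) st) := by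
  induction ts with
  | nil => intro st _ h; exact h
  | cons t ts ih =>
      intro st hts h
      exact ih _ (fun x hx => hts x (by simp [hx])) (pvInv_step s t st (hts t (by simp)) h)

-- findFrom with an empty needle returns its (in-range) start
theorem pvFindFrom_nil (s : List Char) (k : Nat) (hk : k ≤ s.length) :
    PySem.Chars.findFrom s [] (k : Nat) = (k : Int) := by
  rw [PySem.Chars.findFrom_natCast s [] k hk, PySem.Chars.find_nil]
  simp

-- a successful find of a nonempty needle that is not a suffix ends strictly before len
theorem pvFindFrom_not_suffix (s sub : List Char) (k : Nat) (hk : k ≤ s.length) (hsub : sub ≠ [])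
    (hns : ¬ sub <:+ s) (h : PySem.Chars.findFrom s sub (k : Int) ≠ -1) :
    PySem.Chars.findFrom s sub (k : Int) + sub.length < s.length := by
  obtain ⟨h1, h2, -⟩ := PySem.Chars.findFrom_natCast_spec s sub k hk h
  obtain ⟨hge, hub⟩ := pvFindFrom_bounds s sub k hk hsub h
  rcases lt_or_eq_of_le hub with hlt | heq
  · exact hlt
  · exfalso
    have hlen2 : sub.length = (List.drop (PySem.Chars.findFrom s sub (k : Int)).toNat s).length := by
      simp only [List.length_drop]
      omega
    have := h2.eq_of_length hlen2
    exact hns (this ▸ List.drop_suffix _ s)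

-- variant invariant when no nonempty token is a suffix of s: the cursor and every
-- recorded start stay ≤ len-1 (Nat-clamped), so rewound finds cannot go backwards
def pvInv2 (s : String) (st : List (Int × Int) × Int) : Prop :=
  (st.2 = -1 ∨ (0 ≤ st.2 ∧ st.2 ≤ ((s.toList.length - 1 : Nat) : Int))) ∧
  st.1.Pairwise (fun p q => p.1 ≤ q.1) ∧
  ∀ p ∈ st.1, p.1 ≤ ((s.toList.length - 1 : Nat) : Int) ∧ (st.2 ≠ -1 → p.1 ≤ st.2)

theorem pvInv2_step (s token : String) (st : List (Int × Int) × Int)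
    (ht : token ≠ "" → PySem.Str.endswith s token = false) (h : pvInv2 s st) :
    pvInv2 s (pvFindStep s st token) := by
  obtain ⟨hpos, hpw, hmem⟩ := h
  simp only [pvFindStep]
  by_cases hneg : PySem.Str.findFrom s token st.2 = -1
  · simp only [hneg]
    exact ⟨Or.inl rfl, hpw, fun p hp => ⟨(hmem p hp).1, fun hc => absurd rfl hc⟩⟩
  · simp only [if_neg hneg]
    have hbridge : PySem.Str.findFrom s token st.2 = PySem.Chars.findFrom s.toList token.toList st.2 := by
      simp
    obtain ⟨k, hk, hkK, hkeq, hkstart⟩ :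
        ∃ k : Nat, k ≤ s.toList.length ∧ (k : Int) ≤ ((s.toList.length - 1 : Nat) : Int) ∧
          PySem.Str.findFrom s token st.2 = PySem.Chars.findFrom s.toList token.toList (k : Int) ∧
          ∀ p ∈ st.1, p.1 ≤ (k : Int) := by
      rcases hpos with h1 | ⟨h1, h2⟩
      · refine ⟨s.toList.length - 1, by omega, by omega, ?_, ?_⟩
        · rw [hbridge, h1, pvFindFrom_neg_one]
        · intro p hp
          have := (hmem p hp).1
          omega
      · refine ⟨st.2.toNat, by omega, by omega, ?_, ?_⟩
        · rw [hbridge]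
          have hcast : st.2 = ((st.2.toNat : Nat) : Int) := by omega
          rw [← hcast]
        · intro p hp
          have := (hmem p hp).2 (by omega)
          omega
    have hlen : (PySem.Str.len token : Int) = (token.toList.length : Int) := by
      simp [PySem.Str.len]
    rw [hlen]
    by_cases htok0 : token.toList = []
    · have hr : PySem.Str.findFrom s token st.2 = (k : Int) := by
        rw [hkeq, htok0, pvFindFrom_nil s.toList k hk]
      rw [htok0]
      have h0 : ([] : List Char).length = 0 := rfl
      refine ⟨Or.inr ⟨by omega, by omega⟩, ?_, ?_⟩
      · rw [List.pairwise_append]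
        refine ⟨hpw, List.pairwise_singleton _ _, ?_⟩
        intro p hp q hq
        rw [List.mem_singleton] at hq
        subst hq
        have := hkstart p hp
        omega
      · intro p hp
        rw [List.mem_append, List.mem_singleton] at hp
        rcases hp with hp | hp
        · have ha := (hmem p hp).1
          have hb := hkstart p hp
          exact ⟨ha, fun _ => by omega⟩
        · subst hp
          exact ⟨by omega, fun _ => by omega⟩
    · have htne : token ≠ "" := by
        intro hc
        exact htok0 (by simp [hc])
      have hns : ¬ token.toList <:+ s.toList := by
        intro hsuf
        have := ht htne
        rw [PySem.Str.endswith_eq] at this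
        rw [(PySem.Chars.endswith_iff s.toList token.toList).mpr hsuf] at this
        exact Bool.noConfusion this
      have hnr : PySem.Chars.findFrom s.toList token.toList (k : Int) ≠ -1 := by
        rw [← hkeq]; exact hneg
      obtain ⟨hge, -⟩ := pvFindFrom_bounds s.toList token.toList k hk htok0 hnr
      have hlt := pvFindFrom_not_suffix s.toList token.toList k hk htok0 hns hnr
      rw [← hkeq] at hge hlt
      have htokpos : 0 < token.toList.length := List.length_pos_of_ne_nil htok0
      refine ⟨Or.inr ⟨by omega, by omega⟩, ?_, ?_⟩
      · rw [List.pairwise_append]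
        refine ⟨hpw, List.pairwise_singleton _ _, ?_⟩
        intro p hp q hq
        rw [List.mem_singleton] at hq
        subst hq
        have := le_trans (hkstart p hp) hge
        omega
      · intro p hp
        rw [List.mem_append, List.mem_singleton] at hp
        rcases hp with hp | hp
        · have ha := le_trans (hkstart p hp) hge
          exact ⟨by omega, fun _ => by omega⟩
        · subst hp
          exact ⟨by omega, fun _ => by omega⟩

theorem pvInv2_fold (s : String) (ts : List String) :
    ∀ st, (∀ t ∈ ts, t ≠ "" → PySem.Str.endswith s t = false) → pvInv2 s st →
      pvInv2 s (ts.foldl (pvFindStep s) st) := by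
  induction ts with
  | nil => intro st _ h; exact h
  | cons t ts ih =>
      intro st hts h
      exact ih _ (fun x hx => hts x (by simp [hx])) (pvInv2_step s t st (hts t (by simp)) h)

-- one find step started with accumulator acc appends to acc what it appends to []
theorem pvFindStep_acc (s t : String) (acc : List (Int × Int)) (pos : Int) :
    pvFindStep s (acc, pos) t = (acc ++ (pvFindStep s ([], pos) t).1, (pvFindStep s ([], pos) t).2) := by
  simp only [pvFindStep]
  by_cases hc : PySem.Str.findFrom s t pos = -1
  · simp only [if_pos hc]
    simp
  · simp only [if_neg hc]
    simp

-- A's find loop with accumulator acc prepends acc to its output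
theorem pvFind_acc (s : String) (ts : List String) :
    ∀ (acc : List (Int × Int)) (pos : Int),
    ts.foldl (pvFindStep s) (acc, pos) =
      (acc ++ (ts.foldl (pvFindStep s) ([], pos)).1, (ts.foldl (pvFindStep s) ([], pos)).2) := by
  induction ts with
  | nil => intro acc pos; simp
  | cons t ts ih =>
      intro acc pos
      simp only [List.foldl_cons]
      rcases hX : pvFindStep s ([], pos) t with ⟨e, p2⟩
      rw [pvFindStep_acc s t acc pos, hX, ih (acc ++ e) p2, ih e p2]
      simp

-- fusion, open-span state
theorem pvFuse_some (s : String) (g : Int) (ts : List String) :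
    ∀ (spans : List (Int × Int)) (cs ce pos : Int),
    ts.foldl (pvFusedStep s g) (spans, some (cs, ce), pos) =
      ((((ts.foldl (pvFindStep s) ([], pos)).1).foldl (pvGroupStep g) (spans, cs, ce)).1,
        some ((((ts.foldl (pvFindStep s) ([], pos)).1).foldl (pvGroupStep g) (spans, cs, ce)).2.1,
              (((ts.foldl (pvFindStep s) ([], pos)).1).foldl (pvGroupStep g) (spans, cs, ce)).2.2),
        (ts.foldl (pvFindStep s) ([], pos)).2) := by
  induction ts with
  | nil => intro spans cs ce pos; simp
  | cons t ts ih =>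
      intro spans cs ce pos
      simp only [List.foldl_cons]
      by_cases hc : PySem.Str.findFrom s t pos = -1
      · have h1 : pvFusedStep s g (spans, some (cs, ce), pos) t = (spans, some (cs, ce), -1) := by
          simp only [pvFusedStep, hc]; simp
        have h2 : pvFindStep s ([], pos) t = ([], -1) := by
          simp only [pvFindStep, hc]; simp
        rw [h1, h2, ih]
      · have h2 : pvFindStep s ([], pos) t =
            ([(PySem.Str.findFrom s t pos, PySem.Str.findFrom s t pos + (PySem.Str.len t : Int))],
              PySem.Str.findFrom s t pos + (PySem.Str.len t : Int)) := by
          simp only [pvFindStep, if_neg hc]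
          simp
        rw [h2, pvFind_acc s ts, List.singleton_append, List.foldl_cons]
        by_cases hg : PySem.Str.findFrom s t pos - ce ≤ g
        · have h1 : pvFusedStep s g (spans, some (cs, ce), pos) t =
              (spans, some (cs, PySem.Str.findFrom s t pos + (PySem.Str.len t : Int)),
                PySem.Str.findFrom s t pos + (PySem.Str.len t : Int)) := by
            simp only [pvFusedStep, if_neg hc, if_pos hg]
          have hgs : pvGroupStep g (spans, cs, ce)
              (PySem.Str.findFrom s t pos, PySem.Str.findFrom s t pos + (PySem.Str.len t : Int)) =
              (spans, cs, PySem.Str.findFrom s t pos + (PySem.Str.len t : Int)) := by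
            simp only [pvGroupStep, if_pos hg]
          rw [h1, ih, hgs]
        · have h1 : pvFusedStep s g (spans, some (cs, ce), pos) t =
              (spans ++ [(cs, ce)],
                some (PySem.Str.findFrom s t pos, PySem.Str.findFrom s t pos + (PySem.Str.len t : Int)),
                PySem.Str.findFrom s t pos + (PySem.Str.len t : Int)) := by
            simp only [pvFusedStep, if_neg hc, if_neg hg]
          have hgs : pvGroupStep g (spans, cs, ce)
              (PySem.Str.findFrom s t pos, PySem.Str.findFrom s t pos + (PySem.Str.len t : Int)) =
              (spans ++ [(cs, ce)], PySem.Str.findFrom s t pos,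
                PySem.Str.findFrom s t pos + (PySem.Str.len t : Int)) := by
            simp only [pvGroupStep, if_neg hg]
          rw [h1, ih, hgs]

-- fusion, no-span-open state
theorem pvFuse_none (s : String) (g : Int) (ts : List String) :
    ∀ (pos : Int),
    ts.foldl (pvFusedStep s g) ([], none, pos) =
      (match (ts.foldl (pvFindStep s) ([], pos)).1 with
       | [] => ([], none, (ts.foldl (pvFindStep s) ([], pos)).2)
       | p0 :: rest =>
          ((rest.foldl (pvGroupStep g) ([], p0.1, p0.2)).1,
            some ((rest.foldl (pvGroupStep g) ([], p0.1, p0.2)).2.1,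
                  (rest.foldl (pvGroupStep g) ([], p0.1, p0.2)).2.2),
            (ts.foldl (pvFindStep s) ([], pos)).2)) := by
  induction ts with
  | nil => intro pos; simp
  | cons t ts ih =>
      intro pos
      simp only [List.foldl_cons]
      by_cases hc : PySem.Str.findFrom s t pos = -1
      · have h1 : pvFusedStep s g ([], none, pos) t = ([], none, -1) := by
          simp only [pvFusedStep, hc]; simp
        have h2 : pvFindStep s ([], pos) t = ([], -1) := by
          simp only [pvFindStep, hc]; simp
        rw [h1, h2, ih]
      · have h1 : pvFusedStep s g ([], none, pos) t =
            ([], some (PySem.Str.findFrom s t pos, PySem.Str.findFrom s t pos + (PySem.Str.len t : Int)),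
              PySem.Str.findFrom s t pos + (PySem.Str.len t : Int)) := by
          simp only [pvFusedStep, if_neg hc]
        have h2 : pvFindStep s ([], pos) t =
            ([(PySem.Str.findFrom s t pos, PySem.Str.findFrom s t pos + (PySem.Str.len t : Int))],
              PySem.Str.findFrom s t pos + (PySem.Str.len t : Int)) := by
          simp only [pvFindStep, if_neg hc]
          simp
        rw [h1, h2, pvFind_acc s ts, List.singleton_append, pvFuse_some s g ts]

-- A equals B as soon as the emitted positions are already sorted by start
theorem pvKey (s : String) (ts : List String) (g : Int)
    (hsorted : PySem.List.sorted (ts.foldl (pvFindStep s) ([], (0 : Int))).1 (fun x => x.1) false =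
      (ts.foldl (pvFindStep s) ([], (0 : Int))).1) :
    group_adjacent_tokens s ts g = group_adjacent_tokens_alt s ts g := by
  simp only [group_adjacent_tokens, group_adjacent_tokens_alt, find_token_indices]
  rw [pvFuse_none s g ts 0]
  rcases hps : (ts.foldl (pvFindStep s) ([], (0 : Int))).1 with _ | ⟨p0, rest⟩
  · simp
  · rw [hps] at hsorted
    simp [hsorted]

-- ===== VERDICT (by name: the statement is the Claim_ definition above) =====
theorem group_adjacent_tokens_spec : Claim_equal_group_adjacent_tokens := by
  intro s ts g _hdom hpre
  unfold Spec_group_adjacent_tokens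
  rcases hpre with hpre | hpre
  · have hinv := pvInv_fold s ts ([], 0) hpre
      ⟨Or.inr ⟨le_refl 0, by positivity⟩, List.Pairwise.nil, fun p hp => absurd hp (List.not_mem_nil)⟩
    exact pvKey s ts g
      (PySem.List.sorted_eq_self_of_pairwise ((ts.foldl (pvFindStep s) ([], (0 : Int))).1)
        (fun x => x.1) hinv.2.1)
  · have hinv := pvInv2_fold s ts ([], 0) hpre
      ⟨Or.inr ⟨le_refl 0, by positivity⟩, List.Pairwise.nil, fun p hp => absurd hp (List.not_mem_nil)⟩
    exact pvKey s ts g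
      (PySem.List.sorted_eq_self_of_pairwise ((ts.foldl (pvFindStep s) ([], (0 : Int))).1)
        (fun x => x.1) hinv.2.1)
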